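-- pv_equiv track=rewrite | github.com/harshitkhandelwal208/RailMan | app/services/rail_network.py | available_line_paths
-- ===== SOURCE A (Python) =====
-- from typing import Dict, List, Optional, Sequence
--
-- def available_line_paths(source_lines: Sequence[str], destination_lines: Sequence[str]) -> List[List[str]]:
--     adjacency = {
--         "western": ["central"],
--         "central": ["western", "harbour"],
--         "harbour": ["central"],
--     }
--     from collections import deque
--
--     paths: List[List[str]] = []
--     for src in source_lines:
--         for dst in destination_lines:
--             q = deque([(src, [src])])
--             seen = {src}
--             while q:
--                 node, path = q.popleft()
--                 if node == dst:
--                     paths.append(path)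
--                     break
--                 for nxt in adjacency.get(node, []):
--                     if nxt in seen:
--                         continue
--                     if len(path) >= 3:
--                         continue
--                     seen.add(nxt)
--                     q.append((nxt, path + [nxt]))
--     uniq: List[List[str]] = []
--     seen_paths = set()
--     for p in paths:
--         tp = tuple(p)
--         if tp not in seen_paths:
--             seen_paths.add(tp)
--             uniq.append(p)
--     return uniq
-- ===== SOURCE B (Python) =====
-- from typing import List, Sequence
--
-- _ORDER = ["western", "central", "harbour"]
-- _IDX = {"western": 0, "central": 1, "harbour": 2}
--
-- def _pair(src: str, dst: str) -> List[List[str]]: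
--     if src == dst:
--         return [[src]]
--     if src in _IDX and dst in _IDX:
--         i, j = _IDX[src], _IDX[dst]
--         if i < j:
--             return [_ORDER[i:j + 1]]
--         return [_ORDER[j:i + 1][::-1]]
--     return []
--
-- def _dedup(paths, seen):
--     if not paths:
--         return []
--     p, rest = paths[0], paths[1:]
--     if tuple(p) in seen:
--         return _dedup(rest, seen)
--     return [p] + _dedup(rest, seen | {tuple(p)})
--
-- def available_line_paths(source_lines: Sequence[str], destination_lines: Sequence[str]) -> List[List[str]]:
--     paths = [p for src in source_lines for dst in destination_lines for p in _pair(src, dst)]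
--     return _dedup(paths, set())
-- ===== Notes on version B (the rewrite author's own statement) =====
-- stated objective: simpler
-- what changed: Per-pair BFS over the hard-coded 3-line adjacency graph is replaced by closed-form path construction: index both lines in the fixed linear order ['western','central','harbour'] and slice (or reverse-slice) that order, with the same src==dst single-node case and a recursive first-occurrence dedup instead of the fold with an accumulator pair.
import Mathlib
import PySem

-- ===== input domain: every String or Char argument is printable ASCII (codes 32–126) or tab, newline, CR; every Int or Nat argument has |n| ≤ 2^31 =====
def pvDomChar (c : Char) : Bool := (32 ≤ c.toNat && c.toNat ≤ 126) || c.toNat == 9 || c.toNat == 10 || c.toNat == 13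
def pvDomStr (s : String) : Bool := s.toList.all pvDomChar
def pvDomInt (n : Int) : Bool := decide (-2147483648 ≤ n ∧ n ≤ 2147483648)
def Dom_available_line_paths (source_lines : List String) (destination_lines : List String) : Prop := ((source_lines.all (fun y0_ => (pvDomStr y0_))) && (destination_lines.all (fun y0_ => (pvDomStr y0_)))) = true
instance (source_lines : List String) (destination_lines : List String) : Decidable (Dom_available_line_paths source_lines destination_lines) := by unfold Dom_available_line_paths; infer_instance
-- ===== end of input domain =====

-- B replaces per-pair BFS over the fixed 3-line adjacency graph by closed-form index slicing on
-- the linear order ["western","central","harbour"]; objective: simpler.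

-- ===== PORT A =====
-- the literal adjacency dict of A
def adjA : PySem.Dict String (List String) :=
  PySem.Dict.ofList [("western", ["central"]), ("central", ["western", "harbour"]), ("harbour", ["central"])]

-- one step of A's inner 'for nxt in adjacency.get(node, [])' loop
def bfsPush (path : List String) (sq : PySem.Set String × List (String × List String)) (nxt : String) :
    PySem.Set String × List (String × List String) :=
  if PySem.Set.contains sq.1 nxt then sq
  else if 3 ≤ path.length then sq
  else (PySem.Set.add sq.1 nxt, sq.2 ++ [(nxt, path ++ [nxt])])

-- A's BFS while-loop: returns the first path reaching dst (the 'break'), none when the queue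
-- empties.  The fuel argument only makes the recursion structural: every enqueue adds a line
-- not yet in 'seen' ⊆ {src} ∪ {"western","central","harbour"}, so the loop pops at most 4
-- entries and fuel 8 is never exhausted (the characterisation lemmas below cover all inputs).
def bfsA (dst : String) (fuel : Nat) (q : List (String × List String))
    (seen : PySem.Set String) : Option (List String) :=
  match fuel, q with
  | _, [] => none
  | 0, _ => none
  | fuel + 1, (node, path) :: qs =>
    if node == dst then some path
    else
      let sq := (PySem.Dict.getD adjA node []).foldl (bfsPush path) (seen, qs)
      bfsA dst fuel sq.2 sq.1

-- A's final dedup loop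
def dedupA (ps : List (List String)) : List (List String) :=
  (ps.foldl
    (fun (acc : List (List String) × PySem.Set (List String)) p =>
      if PySem.Set.contains acc.2 p then acc else (acc.1 ++ [p], PySem.Set.add acc.2 p))
    ([], PySem.Set.empty)).1

def available_line_paths (source_lines : List String) (destination_lines : List String) :
    List (List String) :=
  let paths := source_lines.foldl (fun acc src =>
    destination_lines.foldl (fun acc dst =>
      match bfsA dst 8 [(src, [src])] (PySem.Set.ofList [src]) with
      | some p => acc ++ [p]
      | none => acc) acc) []
  dedupA paths

-- ===== PORT B =====
def orderB : List String := ["western", "central", "harbour"]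
def idxB : PySem.Dict String Int :=
  PySem.Dict.ofList [("western", 0), ("central", 1), ("harbour", 2)]

-- B's _pair: 0-or-1 closed-form paths for one (src, dst)
def pairB (src : String) (dst : String) : List (List String) :=
  if src == dst then [[src]]
  else
    match PySem.Dict.get? idxB src, PySem.Dict.get? idxB dst with
    | some i, some j =>
        if i < j then [PySem.List.slice orderB (some i) (some (j + 1))]
        else [(PySem.List.slice orderB (some j) (some (i + 1))).reverse]
    | _, _ => []

-- B's _dedup: recursion on the path list carrying the seen set
def dedupB (ps : List (List String)) (seen : PySem.Set (List String)) : List (List String) :=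
  match ps with
  | [] => []
  | p :: rest =>
    if PySem.Set.contains seen p then dedupB rest seen
    else p :: dedupB rest (PySem.Set.add seen p)

def available_line_paths_alt (source_lines : List String) (destination_lines : List String) :
    List (List String) :=
  dedupB (source_lines.flatMap (fun src => destination_lines.flatMap (fun dst => pairB src dst)))
    PySem.Set.empty

-- ===== PRECONDITION & SPEC =====
def Spec_available_line_paths (source_lines : List String) (destination_lines : List String) (out : List (List String)) : Prop := out = available_line_paths_alt source_lines destination_lines
instance (source_lines : List String) (destination_lines : List String) (out : List (List String)) : Decidable (Spec_available_line_paths source_lines destination_lines out) := by unfold Spec_available_line_paths; infer_instance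

-- ===== CLAIM (what is proved, stated in full; the proofs are below) =====
def Claim_equal_available_line_paths : Prop := ∀ (source_lines : List String) (destination_lines : List String), Dom_available_line_paths source_lines destination_lines → Spec_available_line_paths source_lines destination_lines (available_line_paths source_lines destination_lines)

-- ===== LEMMAS AND PROOFS =====

lemma dedup_eq_mem (ps : List (List String)) :
    ∀ (acc : List (List String)) (seen : PySem.Set (List String)),
      (ps.foldl
        (fun (acc : List (List String) × PySem.Set (List String)) p =>
          if p ∈ acc.2 then acc else (acc.1 ++ [p], PySem.Set.add acc.2 p))
        (acc, seen)).1 = acc ++ dedupB ps seen := by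
  induction ps with
  | nil => intro acc seen; simp [dedupB]
  | cons p rest ih =>
    intro acc seen
    by_cases h : p ∈ seen <;> simp [dedupB, h, ih]

lemma dedup_eq (ps : List (List String)) (acc : List (List String))
    (seen : PySem.Set (List String)) :
    (ps.foldl
      (fun (acc : List (List String) × PySem.Set (List String)) p =>
        if PySem.Set.contains acc.2 p then acc else (acc.1 ++ [p], PySem.Set.add acc.2 p))
      (acc, seen)).1 = acc ++ dedupB ps seen := by
  have lameq :
      (fun (acc : List (List String) × PySem.Set (List String)) p =>
        if PySem.Set.contains acc.2 p then acc else (acc.1 ++ [p], PySem.Set.add acc.2 p)) =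
      (fun (acc : List (List String) × PySem.Set (List String)) p =>
        if p ∈ acc.2 then acc else (acc.1 ++ [p], PySem.Set.add acc.2 p)) := by
    funext a b
    by_cases hb : b ∈ a.2 <;> simp [hb]
  rw [lameq]
  exact dedup_eq_mem ps acc seen

lemma adjA_mk : adjA = PySem.Dict.mk
    [("western", ["central"]), ("central", ["western", "harbour"]), ("harbour", ["central"])] := by
  decide

lemma idxB_mk : idxB = PySem.Dict.mk [("western", 0), ("central", 1), ("harbour", 2)] := by
  decide

lemma bfs_toList (src dst : String) :
    (bfsA dst 8 [(src, [src])] (PySem.Set.ofList [src])).toList = pairB src dst := by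
  have hofl : PySem.Set.ofList [src] = [src] := by
    simp [PySem.Set.ofList_eq_self_of_nodup]
  by_cases hsd : src = dst
  · subst hsd
    simp [bfsA, pairB]
  · have hne : (src == dst) = false := beq_eq_false_iff_ne.mpr hsd
    by_cases hw : src = "western"
    · subst hw
      by_cases h1 : dst = "central"
      · subst h1
        simp [bfsA, hofl, adjA_mk, bfsPush, pairB, idxB_mk, orderB,
          PySem.Dict.getD, PySem.List.slice, PySem.Dict.get?]
      · by_cases h2 : dst = "harbour"
        · subst h2
          simp [bfsA, hofl, adjA_mk, bfsPush, pairB, idxB_mk, orderB,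
            PySem.Dict.getD, PySem.List.slice, PySem.Dict.get?]
        · have b1 : ("central" == dst) = false := beq_eq_false_iff_ne.mpr (Ne.symm h1)
          have b2 : ("harbour" == dst) = false := beq_eq_false_iff_ne.mpr (Ne.symm h2)
          simp [bfsA, hofl, hne, b1, b2, adjA_mk, bfsPush, pairB, idxB_mk,
            PySem.Dict.getD, PySem.Dict.get?]
    · by_cases hc : src = "central"
      · subst hc
        by_cases h1 : dst = "western"
        · subst h1
          simp [bfsA, hofl, adjA_mk, bfsPush, pairB, idxB_mk, orderB,
            PySem.Dict.getD, PySem.List.slice, PySem.Dict.get?]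
        · by_cases h2 : dst = "harbour"
          · subst h2
            simp [bfsA, hofl, adjA_mk, bfsPush, pairB, idxB_mk, orderB,
              PySem.Dict.getD, PySem.List.slice, PySem.Dict.get?]
          · have b1 : ("western" == dst) = false := beq_eq_false_iff_ne.mpr (Ne.symm h1)
            have b2 : ("harbour" == dst) = false := beq_eq_false_iff_ne.mpr (Ne.symm h2)
            simp [bfsA, hofl, hne, b1, b2, adjA_mk, bfsPush, pairB, idxB_mk,
              PySem.Dict.getD, PySem.Dict.get?]
      · by_cases hh : src = "harbour"
        · subst hh
          by_cases h1 : dst = "central"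
          · subst h1
            simp [bfsA, hofl, adjA_mk, bfsPush, pairB, idxB_mk, orderB,
              PySem.Dict.getD, PySem.List.slice, PySem.Dict.get?]
          · by_cases h2 : dst = "western"
            · subst h2
              simp [bfsA, hofl, adjA_mk, bfsPush, pairB, idxB_mk, orderB,
                PySem.Dict.getD, PySem.List.slice, PySem.Dict.get?]
            · have b1 : ("central" == dst) = false := beq_eq_false_iff_ne.mpr (Ne.symm h1)
              have b2 : ("western" == dst) = false := beq_eq_false_iff_ne.mpr (Ne.symm h2)
              simp [bfsA, hofl, hne, b1, b2, adjA_mk, bfsPush, pairB, idxB_mk,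
                PySem.Dict.getD, PySem.Dict.get?]
        · have c1 : ("western" == src) = false := beq_eq_false_iff_ne.mpr (Ne.symm hw)
          have c2 : ("central" == src) = false := beq_eq_false_iff_ne.mpr (Ne.symm hc)
          have c3 : ("harbour" == src) = false := beq_eq_false_iff_ne.mpr (Ne.symm hh)
          simp [bfsA, hofl, hne, c1, c2, c3, adjA_mk, pairB, idxB_mk,
            PySem.Dict.getD, PySem.Dict.get?]

lemma match_toList (acc : List (List String)) (o : Option (List String)) :
    (match o with | some p => acc ++ [p] | none => acc) = acc ++ o.toList := by
  cases o <;> simp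

lemma paths_eq (s d : List String) :
    available_line_paths s d = available_line_paths_alt s d := by
  unfold available_line_paths available_line_paths_alt dedupA
  rw [dedup_eq]
  simp only [List.nil_append]
  congr 1
  have hinner : ∀ (acc : List (List String)) (src : String),
      d.foldl (fun acc dst =>
        match bfsA dst 8 [(src, [src])] (PySem.Set.ofList [src]) with
        | some p => acc ++ [p]
        | none => acc) acc = acc ++ d.flatMap (fun dst => pairB src dst) := by
    intro acc src
    have : ∀ (acc : List (List String)) (dst : String),
        (match bfsA dst 8 [(src, [src])] (PySem.Set.ofList [src]) with
         | some p => acc ++ [p]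
         | none => acc) = acc ++ pairB src dst := by
      intro acc dst
      rw [match_toList, bfs_toList]
    simp only [this]
    exact PySem.List.foldl_append_eq_flatMap _ _ _
  simp only [hinner]
  simpa using PySem.List.foldl_append_eq_flatMap (fun src => d.flatMap (fun dst => pairB src dst)) s []

-- ===== VERDICT (by name: the statement is the Claim_ definition above) =====
theorem available_line_paths_spec : Claim_equal_available_line_paths := by
  intro s d _
  unfold Spec_available_line_paths
  exact paths_eq s d
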